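-- pv_equiv track=rewrite | github.com/weirdkidsima/penzGTU | Math/Alehina/3.py | check_antitransitivity
-- ===== SOURCE A (Python) =====
-- def check_antitransitivity(matrix):
--     # Проверяем антитранзитивность отношения:
--     # Если (i, j) и (j, k) в отношении, то (i, k) не должно быть в отношении
--     for i in range(len(matrix)):
--         for j in range(len(matrix)):
--             if matrix[i][j] == 1:
--                 for k in range(len(matrix)):
--                     if matrix[j][k] == 1 and matrix[i][k] == 1:
--                         return "Не антитранзитивно"
--     return "Антитранзитивно"
-- ===== SOURCE B (Python) =====
-- def _row_mask(matrix, n, i):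
--     m = 0
--     for j in range(n):
--         if matrix[i][j] == 1:
--             m |= 1 << j
--     return m
--
-- def check_antitransitivity(matrix):
--     # Bit-parallel reformulation: encode each row as an integer bitmask.
--     # Two-step reachability from i is the OR of masks[j] over the bits j of
--     # masks[i]; the relation is antitransitive iff for every i that
--     # reachability word is disjoint from masks[i] itself.
--     n = len(matrix)
--     masks = [_row_mask(matrix, n, i) for i in range(n)]
--     for i in range(n):
--         reach2 = 0
--         for j in range(n):
--             if masks[i] >> j & 1:
--                 reach2 |= masks[j]
--         if masks[i] & reach2:
--             return "Не антитранзитивно"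
--     return "Антитранзитивно"
-- ===== Notes on version B (the rewrite author's own statement) =====
-- stated objective: alternative
-- what changed: Encodes each row as an integer bitmask; the two-step reachability word for row i is the bitwise OR of the masks of i's successors, and antitransitivity fails iff that word overlaps row i's own mask - the innermost k-loop disappears into word-parallel AND/OR operations.
-- outside the precondition, e.g. on check_antitransitivity([[1, 1], [1]]): A returns 'Не антитранзитивно', B raises IndexError
import Mathlib
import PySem

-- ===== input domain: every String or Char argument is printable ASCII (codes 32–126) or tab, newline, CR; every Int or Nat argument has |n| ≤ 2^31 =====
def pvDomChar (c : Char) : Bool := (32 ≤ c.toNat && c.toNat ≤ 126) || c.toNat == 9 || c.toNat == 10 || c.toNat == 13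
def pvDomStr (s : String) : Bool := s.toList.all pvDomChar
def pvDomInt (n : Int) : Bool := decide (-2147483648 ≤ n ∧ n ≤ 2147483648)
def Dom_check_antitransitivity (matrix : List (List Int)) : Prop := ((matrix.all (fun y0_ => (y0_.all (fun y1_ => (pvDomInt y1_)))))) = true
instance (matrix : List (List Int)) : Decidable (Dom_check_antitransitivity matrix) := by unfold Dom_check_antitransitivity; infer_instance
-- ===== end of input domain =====

-- B encodes each row as an integer bitmask and tests, per row, whether the union of its
-- successors' rows overlaps the row itself (bit-parallel two-step reachability).

-- ===== PORT A =====
-- matrix[i][j] is List.getD: exact for the nonnegative in-range indices guaranteed by Pre_.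
def check_antitransitivity (matrix : List (List Int)) : String :=
  let n := matrix.length
  if (List.range n).any (fun i =>
      (List.range n).any (fun j =>
        ((matrix.getD i []).getD j 0 == 1) &&
        (List.range n).any (fun k =>
          ((matrix.getD j []).getD k 0 == 1) && ((matrix.getD i []).getD k 0 == 1))))
  then "Не антитранзитивно" else "Антитранзитивно"

-- ===== PORT B =====
-- _row_mask: m = 0; for j in range(n): if matrix[i][j] == 1: m |= 1 << j
def rowMask (matrix : List (List Int)) (n i : Nat) : Nat :=
  (List.range n).foldl
    (fun m j => if (matrix.getD i []).getD j 0 == 1 then m ||| (1 <<< j) else m) 0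

def check_antitransitivity_alt (matrix : List (List Int)) : String :=
  let n := matrix.length
  let masks := (List.range n).map (fun i => rowMask matrix n i)
  if (List.range n).any (fun i =>
      let reach2 := (List.range n).foldl
        (fun a j => if masks.getD i 0 >>> j &&& 1 != 0 then a ||| masks.getD j 0 else a) 0
      masks.getD i 0 &&& reach2 != 0)
  then "Не антитранзитивно" else "Антитранзитивно"

-- ===== PRECONDITION & SPEC =====
-- Pre_ excludes ragged matrices (some row shorter than len(matrix)): there A raises IndexError,
-- except when an early return happens to fire before the short row is reached, in which case
-- A's returning at all is an artefact of scan order and B raises while building the masks.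
def Pre_check_antitransitivity (matrix : List (List Int)) : Prop :=
  ∀ row ∈ matrix, matrix.length ≤ row.length
instance (matrix : List (List Int)) : Decidable (Pre_check_antitransitivity matrix) := by
  unfold Pre_check_antitransitivity; infer_instance
def pvWitness_check_antitransitivity : List (List Int) := [[0, 1], [0, 0]]

def Spec_check_antitransitivity (matrix : List (List Int)) (out : String) : Prop := out = check_antitransitivity_alt matrix
instance (matrix : List (List Int)) (out : String) : Decidable (Spec_check_antitransitivity matrix out) := by unfold Spec_check_antitransitivity; infer_instance

-- ===== CLAIM (what is proved, stated in full; the proofs are below) =====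
def Claim_equal_check_antitransitivity : Prop := ∀ (matrix : List (List Int)), Dom_check_antitransitivity matrix → Pre_check_antitransitivity matrix → Spec_check_antitransitivity matrix (check_antitransitivity matrix)

-- ===== LEMMAS AND PROOFS =====

-- Python's `x >> j & 1` truthiness is exactly testBit
theorem shiftand_eq_testBit (x j : Nat) : (x >>> j &&& 1 != 0) = x.testBit j := by
  simp [Nat.testBit, Nat.and_comm]

-- bit j of an `m |= 1 << x` accumulation over range n
theorem testBit_maskFold (p : Nat → Bool) (n j : Nat) :
    (((List.range n).foldl (fun m x => if p x then m ||| (1 <<< x) else m) 0).testBit j)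
      = (decide (j < n) && p j) := by
  induction n with
  | zero => simp
  | succ m ih =>
    rw [List.range_succ, List.foldl_append]
    simp only [List.foldl_cons, List.foldl_nil]
    by_cases h : p m = true
    · simp only [h, if_true]
      rw [Nat.testBit_or, ih, Nat.shiftLeft_eq, Nat.one_mul, Nat.testBit_two_pow]
      by_cases hjm : j = m
      · subst hjm; simp [h]
      · have hmj : m ≠ j := fun e => hjm e.symm
        have hiff : j < m + 1 ↔ j < m := by omega
        simp [hmj, hiff]
    · rw [Bool.not_eq_true] at h
      simp only [h, Bool.false_eq_true, if_false]
      rw [ih]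
      by_cases hjm : j = m
      · subst hjm; simp [h]
      · have hiff : j < m + 1 ↔ j < m := by omega
        simp [hiff]

theorem testBit_rowMask (matrix : List (List Int)) (n i j : Nat) :
    (rowMask matrix n i).testBit j
      = (decide (j < n) && ((matrix.getD i []).getD j 0 == 1)) :=
  testBit_maskFold (fun x => (matrix.getD i []).getD x 0 == 1) n j

-- bit k of an OR-accumulating fold over a list
theorem testBit_or_foldl (q : Nat → Bool) (f : Nat → Nat) (l : List Nat) (a k : Nat) :
    ((l.foldl (fun acc j => if q j then acc ||| f j else acc) a).testBit k)
      = (a.testBit k || l.any (fun j => q j && (f j).testBit k)) := by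
  induction l generalizing a with
  | nil => simp
  | cons x xs ih =>
    simp only [List.foldl_cons, List.any_cons]
    rw [ih]
    by_cases h : q x = true
    · simp [h, Nat.testBit_or, Bool.or_assoc]
    · simp [h]

theorem and_bne_zero (a b : Nat) :
    ((a &&& b != 0) = true) ↔ ∃ k, a.testBit k = true ∧ b.testBit k = true := by
  rw [bne_iff_ne]
  constructor
  · intro h
    refine ⟨(a &&& b).log2, ?_⟩
    have := Nat.testBit_log2 h
    rwa [Nat.testBit_and, Bool.and_eq_true] at this
  · rintro ⟨k, ha, hb⟩ h0
    have : (a &&& b).testBit k = true := by rw [Nat.testBit_and, ha, hb]; rfl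
    rw [h0, Nat.zero_testBit] at this
    exact Bool.false_ne_true this

-- getD over a map of range
theorem getD_map_range {α : Type} (n : Nat) (f : Nat → α) (i : Nat) (d : α) (h : i < n) :
    (((List.range n).map f).getD i d) = f i := by
  rw [List.getD_eq_getElem?_getD, List.getElem?_map, List.getElem?_range h]
  rfl

-- the B-side fold's condition, rewritten through testBit
theorem reach2_fun_eq (x : Nat) (f : Nat → Nat) :
    (fun (a j : Nat) => if x >>> j &&& 1 != 0 then a ||| f j else a)
      = (fun (a j : Nat) => if x.testBit j then a ||| f j else a) := by
  funext a j
  simp only [shiftand_eq_testBit]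

-- the two loop conditions agree
theorem cond_iff (matrix : List (List Int)) :
    ((List.range matrix.length).any (fun i =>
      (List.range matrix.length).any (fun j =>
        ((matrix.getD i []).getD j 0 == 1) &&
        (List.range matrix.length).any (fun k =>
          ((matrix.getD j []).getD k 0 == 1) && ((matrix.getD i []).getD k 0 == 1)))))
    = ((List.range matrix.length).any (fun i =>
        ((List.range matrix.length).map (fun i => rowMask matrix matrix.length i)).getD i 0 &&&
          (List.range matrix.length).foldl
            (fun a j => if ((List.range matrix.length).map (fun i => rowMask matrix matrix.length i)).getD i 0 >>> j &&& 1 != 0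
              then a ||| ((List.range matrix.length).map (fun i => rowMask matrix matrix.length i)).getD j 0 else a) 0
          != 0)) := by
  set n := matrix.length with hn
  set M := (List.range n).map (fun i => rowMask matrix n i) with hM
  rw [Bool.eq_iff_iff]
  simp only [List.any_eq_true, List.mem_range, Bool.and_eq_true, beq_iff_eq]
  constructor
  · rintro ⟨i, hi, j, hj, hij, k, hk, hjk, hik⟩
    refine ⟨i, hi, (and_bne_zero _ _).2 ⟨k, ?_, ?_⟩⟩
    · rw [hM, getD_map_range n _ _ _ hi, testBit_rowMask]
      simpa [hk] using hik
    · rw [reach2_fun_eq, testBit_or_foldl]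
      simp only [Nat.zero_testBit, Bool.false_or, List.any_eq_true, List.mem_range,
        Bool.and_eq_true]
      refine ⟨j, hj, ?_, ?_⟩
      · rw [hM, getD_map_range n _ _ _ hi, testBit_rowMask]
        simpa [hj] using hij
      · rw [hM, getD_map_range n _ _ _ hj, testBit_rowMask]
        simpa [hk] using hjk
  · rintro ⟨i, hi, hbody⟩
    obtain ⟨k, hki, hreach⟩ := (and_bne_zero _ _).1 hbody
    rw [hM, getD_map_range n _ _ _ hi, testBit_rowMask] at hki
    simp only [Bool.and_eq_true, decide_eq_true_eq, beq_iff_eq] at hki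
    obtain ⟨hk, hik⟩ := hki
    rw [reach2_fun_eq, testBit_or_foldl] at hreach
    simp only [Nat.zero_testBit, Bool.false_or, List.any_eq_true, List.mem_range,
      Bool.and_eq_true] at hreach
    obtain ⟨j, hj, hbit, hjkbit⟩ := hreach
    rw [hM, getD_map_range n _ _ _ hi, testBit_rowMask] at hbit
    simp only [Bool.and_eq_true, decide_eq_true_eq, beq_iff_eq] at hbit
    rw [hM, getD_map_range n _ _ _ hj, testBit_rowMask] at hjkbit
    simp only [Bool.and_eq_true, decide_eq_true_eq, beq_iff_eq] at hjkbit
    exact ⟨i, hi, j, hj, hbit.2, k, hk, hjkbit.2, hik⟩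

-- ===== VERDICT (by name: the statement is the Claim_ definition above) =====
theorem check_antitransitivity_spec : Claim_equal_check_antitransitivity := by
  intro matrix _ _
  unfold Spec_check_antitransitivity check_antitransitivity check_antitransitivity_alt
  simp only []
  rw [cond_iff]
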